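-- pv_equiv track=rewrite | github.com/afzalsiddique/problem-solving | Problem_Solving_Python/leetcode/lc940.py | distinctSubseqII
-- ===== SOURCE A (Python) =====
-- def distinctSubseqII(s: str) -> int:
--     M=10**9+7
--     s='#'+s
--     n=len(s)
--     dp=[[0]*26 for _ in range(n)]
--     for i in range(1,n):
--         tmp=sum(dp[i-1][j] for j in range(26))%M
--         for j in range(26):
--             dp[i][j]=dp[i-1][j]
--         dp[i][ord(s[i])-ord('a')]=(tmp+1)%M
--     return sum(dp[-1][j] for j in range(26))%M
-- ===== SOURCE B (Python) =====
-- def distinctSubseqII(s: str) -> int: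
--     M = 10**9 + 7
--     last = [0] * 26
--     total = 0
--     for c in s:
--         k = ord(c) - ord('a')
--         contrib = (total + 1) % M
--         total = (total + contrib - last[k]) % M
--         last[k] = contrib
--     return total
-- ===== Notes on version B (the rewrite author's own statement) =====
-- stated objective: faster
-- what changed: Replaces the n x 26 DP table (row copied and re-summed at every step) by a single running total plus a 26-entry last-contribution array updated in O(1) per character.
import Mathlib
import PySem

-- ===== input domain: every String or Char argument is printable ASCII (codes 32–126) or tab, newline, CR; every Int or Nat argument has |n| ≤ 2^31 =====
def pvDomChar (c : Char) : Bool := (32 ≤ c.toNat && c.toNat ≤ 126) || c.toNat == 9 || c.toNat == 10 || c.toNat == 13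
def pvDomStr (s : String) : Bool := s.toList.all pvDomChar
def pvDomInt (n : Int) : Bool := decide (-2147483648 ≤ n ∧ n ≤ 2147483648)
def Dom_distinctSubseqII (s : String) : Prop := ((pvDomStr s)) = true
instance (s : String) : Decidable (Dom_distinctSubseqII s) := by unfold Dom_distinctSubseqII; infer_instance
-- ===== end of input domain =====

-- B replaces A's n×26 DP table (row copied and re-summed each step) by a running
-- total and a 26-entry last-contribution array, O(1) work per character.

def pvM : Int := 1000000007

-- Python list index 'xs[ord(c)-97]' on a 26-list: negative indices wrap by +26;
-- indices outside [-26,25] raise IndexError in both programs (excluded by Pre_).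
def pvK (c : Char) : Nat :=
  (if ((c.toNat : Int) - 97) < 0 then (c.toNat : Int) - 97 + 26 else (c.toNat : Int) - 97).toNat

-- ===== PORT A =====
def distinctSubseqII (s : String) : Int :=
  let s' : List Char := '#' :: s.toList          -- s = '#' + s
  let n : Nat := s'.length
  let dp0 : List (List Int) := List.replicate n (List.replicate 26 0)
  let dp := (PySem.List.pyRange 1 (n : Int) 1).foldl
    (fun dp i =>
      let prev := dp.getD (i - 1).toNat []       -- dp[i-1]
      let tmp := PySem.Int.mod prev.sum pvM      -- sum(dp[i-1][j] for j in range(26)) % M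
      -- the j-copy loop makes dp[i] a copy of dp[i-1]; then dp[i][ord(s[i])-97] = (tmp+1)%M
      dp.set i.toNat (prev.set (pvK (s'.getD i.toNat ' ')) (PySem.Int.mod (tmp + 1) pvM)))
    dp0
  PySem.Int.mod (dp.getD (n - 1) []).sum pvM     -- sum(dp[-1][j] for j in range(26)) % M

-- ===== PORT B =====
def distinctSubseqII_alt (s : String) : Int :=
  (s.toList.foldl
    (fun (st : List Int × Int) c =>
      let k := pvK c                             -- last[ord(c)-97]
      let contrib := PySem.Int.mod (st.2 + 1) pvM
      (st.1.set k contrib, PySem.Int.mod (st.2 + contrib - st.1.getD k 0) pvM))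
    (List.replicate 26 0, 0)).2

-- ===== PRECONDITION & SPEC =====
-- Pre_ excludes exactly the strings on which both Pythons raise IndexError:
-- a character with code < 71 or > 122 gives a 26-list index outside [-26,25].
def Pre_distinctSubseqII (s : String) : Prop :=
  (s.toList.all (fun c => 71 ≤ c.toNat && c.toNat ≤ 122)) = true
instance (s : String) : Decidable (Pre_distinctSubseqII s) := by
  unfold Pre_distinctSubseqII; infer_instance

def pvWitness_distinctSubseqII : String := "abcZab"

def Spec_distinctSubseqII (s : String) (out : Int) : Prop := out = distinctSubseqII_alt s
instance (s : String) (out : Int) : Decidable (Spec_distinctSubseqII s out) := by unfold Spec_distinctSubseqII; infer_instance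

-- ===== CLAIM (what is proved, stated in full; the proofs are below) =====
def Claim_equal_distinctSubseqII : Prop := ∀ (s : String), Dom_distinctSubseqII s → Pre_distinctSubseqII s → Spec_distinctSubseqII s (distinctSubseqII s)

-- ===== LEMMAS AND PROOFS =====

-- the common one-step row transformation: what A does to row i-1 to make row i
def pvG (prev : List Int) (c : Char) : List Int :=
  prev.set (pvK c) (PySem.Int.mod (PySem.Int.mod prev.sum pvM + 1) pvM)

theorem pvK_lt (c : Char) (h1 : 71 ≤ c.toNat) (h2 : c.toNat ≤ 122) : pvK c < 26 := by
  unfold pvK; split_ifs <;> omega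

theorem sum_set_int (l : List Int) (k : Nat) (v : Int) (hk : k < l.length) :
    (l.set k v).sum = l.sum - l.getD k 0 + v := by
  induction l generalizing k with
  | nil => simp at hk
  | cons a t ih =>
    cases k with
    | zero => simp [List.sum_cons]; ring
    | succ m =>
      simp only [List.set_cons_succ, List.sum_cons, List.getD_cons_succ]
      rw [ih m (by simpa using hk)]; ring

theorem length_pvG (prev : List Int) (c : Char) : (pvG prev c).length = prev.length := by
  simp [pvG]

-- B's fold computes A's final row and its reduced sum
theorem b_fold_eq (l : List Char) (last : List Int) (total : Int)
    (hlen : last.length = 26)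
    (htot : total = PySem.Int.mod last.sum pvM)
    (hc : ∀ c ∈ l, 71 ≤ c.toNat ∧ c.toNat ≤ 122) :
    l.foldl
      (fun (st : List Int × Int) c =>
        let k := pvK c
        let contrib := PySem.Int.mod (st.2 + 1) pvM
        (st.1.set k contrib, PySem.Int.mod (st.2 + contrib - st.1.getD k 0) pvM))
      (last, total)
    = (l.foldl pvG last, PySem.Int.mod (l.foldl pvG last).sum pvM) := by
  induction l generalizing last total with
  | nil => simp [htot]
  | cons c t ih =>
    have hk : pvK c < 26 := pvK_lt c (hc c (by simp)).1 (hc c (by simp)).2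
    simp only [List.foldl_cons]
    have hstep : (last.set (pvK c) (PySem.Int.mod (total + 1) pvM)) = pvG last c := by
      rw [pvG, htot]
    have hm : ∀ a : Int, PySem.Int.mod a pvM = a % pvM := fun a =>
      PySem.Int.mod_eq_emod_of_pos (by decide)
    have htot' : PySem.Int.mod (total + PySem.Int.mod (total + 1) pvM - last.getD (pvK c) 0) pvM
        = PySem.Int.mod (pvG last c).sum pvM := by
      rw [pvG, sum_set_int last (pvK c) _ (by omega), htot]
      simp only [hm]
      unfold pvM
      omega
    rw [hstep, htot']
    exact ih (pvG last c) _ (by rw [length_pvG, hlen]) rfl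
      (fun d hd => hc d (by simp [hd]))

-- A's table fold: rows 0..m of the table after steps 1..m are the pvG-prefix rows
theorem a_table (l : List Char) (m : Nat) (hm : m ≤ l.length) :
    (((PySem.List.pyRange 1 ((m : Int) + 1) 1).foldl
      (fun dp i =>
        dp.set i.toNat ((dp.getD (i - 1).toNat []).set
          (pvK (('#' :: l).getD i.toNat ' '))
          (PySem.Int.mod (PySem.Int.mod (dp.getD (i - 1).toNat []).sum pvM + 1) pvM)))
      (List.replicate (l.length + 1) (List.replicate 26 0))).length = l.length + 1)
    ∧ ∀ j ≤ m, ((PySem.List.pyRange 1 ((m : Int) + 1) 1).foldl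
      (fun dp i =>
        dp.set i.toNat ((dp.getD (i - 1).toNat []).set
          (pvK (('#' :: l).getD i.toNat ' '))
          (PySem.Int.mod (PySem.Int.mod (dp.getD (i - 1).toNat []).sum pvM + 1) pvM)))
      (List.replicate (l.length + 1) (List.replicate 26 0))).getD j []
      = (l.take j).foldl pvG (List.replicate 26 0) := by
  induction m with
  | zero =>
    rw [show (((0:Nat):Int) + 1) = 1 by norm_num, PySem.List.pyRange_one_eq_nil le_rfl]
    simp only [List.foldl_nil]
    refine ⟨by simp, ?_⟩
    intro j hj; interval_cases j
    simp [List.getD]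
  | succ m ih =>
    have hm' : m ≤ l.length := by omega
    obtain ⟨hL, hrow⟩ := ih hm'
    rw [show (((m : Nat) + 1 : Nat) : Int) + 1 = ((m : Int) + 1) + 1 by push_cast; ring,
        PySem.List.pyRange_one_succ_right (by omega), List.foldl_append, List.foldl_cons,
        List.foldl_nil]
    set T := (PySem.List.pyRange 1 ((m : Int) + 1) 1).foldl
      (fun dp i =>
        dp.set i.toNat ((dp.getD (i - 1).toNat []).set
          (pvK (('#' :: l).getD i.toNat ' '))
          (PySem.Int.mod (PySem.Int.mod (dp.getD (i - 1).toNat []).sum pvM + 1) pvM)))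
      (List.replicate (l.length + 1) (List.replicate 26 0)) with hT
    have e1 : (((m : Int) + 1) - 1).toNat = m := by omega
    have e2 : ((m : Int) + 1).toNat = m + 1 := by omega
    rw [e1, e2]
    have hmlt : m + 1 < T.length := by rw [hL]; omega
    constructor
    · rw [List.length_set, hL]
    · intro j hj
      rcases Nat.lt_or_ge j (m + 1) with hlt | hge
      · rw [List.getD, List.getElem?_set_ne (by omega), ← List.getD]
        exact hrow j (by omega)
      · have hj' : j = m + 1 := by omega
        subst hj'
        rw [List.getD, List.getElem?_set_self hmlt, Option.getD_some]
        rw [hrow m (le_refl m)]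
        have hchar : ('#' :: l).getD (m + 1) ' ' = l.getD m ' ' := by
          simp
        have hgd : l.getD m ' ' = l[m]'(by omega) := by
          rw [List.getD, List.getElem?_eq_getElem (by omega), Option.getD_some]
        have htake : l.take (m + 1) = l.take m ++ [l.getD m ' '] := by
          rw [hgd]; exact List.take_succ_eq_append_getElem (by omega)
        rw [hchar, htake, List.foldl_append, List.foldl_cons, List.foldl_nil, pvG]

-- ===== VERDICT (by name: the statement is the Claim_ definition above) =====
theorem distinctSubseqII_spec : Claim_equal_distinctSubseqII := by
  intro s _ hpre
  have hpre' : ∀ c ∈ s.toList, 71 ≤ c.toNat ∧ c.toNat ≤ 122 := by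
    intro c hc
    simpa using List.all_eq_true.mp hpre c hc
  unfold Spec_distinctSubseqII distinctSubseqII distinctSubseqII_alt
  simp only [List.length_cons]
  have hcast : ((s.toList.length + 1 : Nat) : Int) = ((s.toList.length : Nat) : Int) + 1 := by
    push_cast; ring
  rw [hcast]
  obtain ⟨hL, hrow⟩ := a_table s.toList s.toList.length (le_refl _)
  rw [b_fold_eq s.toList (List.replicate 26 0) 0 (by simp) (by simp; decide) hpre']
  simp only [Nat.add_sub_cancel]
  rw [hrow s.toList.length (le_refl _), List.take_length]
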